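-- pv_equiv track=rewrite | github.com/mepex/advent_of_code_2023 | 2023/Day12/main.py | replace_qs
-- ===== SOURCE A (Python) =====
-- def replace_qs(m, i, size):
--     s = bin(i)[2:].zfill(size)
--     r = ''
--     j = 0
--     for i in range(len(m)):
--         if m[i] == '?':
--             r += '.' if s[j] == '0' else '#'
--             j += 1
--         else:
--             r += m[i]
--     return r
-- ===== SOURCE B (Python) =====
-- def replace_qs(m, i, size):
--     s = bin(i)[2:].zfill(size)
--     positions = [idx for idx, c in enumerate(m) if c == '?']
--     r = list(m)
--     for k, idx in enumerate(positions):
--         r[idx] = '.' if s[k] == '0' else '#'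
--     return ''.join(r)
-- ===== Notes on version B (the rewrite author's own statement) =====
-- stated objective: alternative
-- what changed: A's single fused scan that appends to a string while counting '?'s with a running bit index is replaced by a two-pass locate-then-fill: first build the list of '?' positions, then mutate a char list in place, setting the k-th '?' position from s[k], and join.
import Mathlib
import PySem

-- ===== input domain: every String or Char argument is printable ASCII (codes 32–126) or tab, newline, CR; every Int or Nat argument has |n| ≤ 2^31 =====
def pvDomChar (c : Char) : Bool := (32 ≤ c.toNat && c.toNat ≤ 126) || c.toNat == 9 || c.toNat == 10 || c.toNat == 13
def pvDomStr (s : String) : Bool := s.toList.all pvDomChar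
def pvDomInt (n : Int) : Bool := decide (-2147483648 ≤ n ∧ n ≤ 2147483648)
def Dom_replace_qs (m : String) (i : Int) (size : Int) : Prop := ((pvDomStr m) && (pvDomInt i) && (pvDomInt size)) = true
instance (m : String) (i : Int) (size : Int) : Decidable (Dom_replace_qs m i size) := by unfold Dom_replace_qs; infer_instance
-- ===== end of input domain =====

-- B replaces A's fused index-counter scan by a two-pass locate-then-fill decomposition
-- (collect the '?' positions, then set each in place); objective: alternative structure, same cost.

-- ===== PORT A =====
-- shared first line of both sources: s = bin(i)[2:].zfill(size)
def pvS (i : Int) (size : Int) : List Char :=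
  PySem.Chars.zfill (PySem.List.slice (PySem.Int.toBinChars0b i) (some 2) none) size

-- fused scan: for i in range(len(m)): append bit or char, bumping the bit counter j.
-- Python raises IndexError exactly where pyGetD would use its default '0';
-- Pre_replace_qs excludes those inputs, so the default is never read under Pre_.
def replace_qs (m : String) (i : Int) (size : Int) : String :=
  String.ofList
    ((PySem.List.pyRange 0 (PySem.List.len m.toList) 1).foldl
      (fun (st : List Char × Int) ix =>
        if PySem.List.pyGetD m.toList ix ' ' = '?' then
          (st.1 ++ [if PySem.List.pyGetD (pvS i size) st.2 '0' = '0' then '.' else '#'], st.2 + 1)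
        else
          (st.1 ++ [PySem.List.pyGetD m.toList ix ' '], st.2)) ([], 0)).1

-- ===== PORT B =====
-- two passes: collect the '?' positions, then fill them in place (r[idx] = bit k);
-- the same pyGetD default stands in for the IndexError Pre_replace_qs excludes.
def replace_qs_alt (m : String) (i : Int) (size : Int) : String :=
  String.ofList
    ((PySem.List.enumerate
        ((PySem.List.enumerate m.toList 0).filterMap
          (fun p => if p.2 = '?' then some p.1 else none)) 0).foldl
      (fun (r : List Char) q =>
        r.set q.2.toNat (if PySem.List.pyGetD (pvS i size) q.1 '0' = '0' then '.' else '#'))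
      m.toList)

-- ===== PRECONDITION & SPEC =====
-- Pre_ excludes exactly the inputs where Python A raises IndexError: more '?' in m than
-- len(bin(i)[2:].zfill(size)); that length equals max(len(bin(i)[2:]), size) by length_zfill.
def Pre_replace_qs (m : String) (i : Int) (size : Int) : Prop :=
  m.toList.count '?' ≤ max (PySem.List.slice (PySem.Int.toBinChars0b i) (some 2) none).length size.toNat
instance (m : String) (i : Int) (size : Int) : Decidable (Pre_replace_qs m i size) := by unfold Pre_replace_qs; infer_instance
def pvWitness_replace_qs : String × Int × Int := ("?a.?", 2, 3)

def Spec_replace_qs (m : String) (i : Int) (size : Int) (out : String) : Prop := out = replace_qs_alt m i size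
instance (m : String) (i : Int) (size : Int) (out : String) : Decidable (Spec_replace_qs m i size out) := by unfold Spec_replace_qs; infer_instance

-- ===== CLAIM (what is proved, stated in full; the proofs are below) =====
def Claim_equal_replace_qs : Prop := ∀ (m : String) (i : Int) (size : Int), Dom_replace_qs m i size → Pre_replace_qs m i size → Spec_replace_qs m i size (replace_qs m i size)

-- ===== LEMMAS AND PROOFS =====

-- reference result: walk the characters, the j-th '?' becomes bit j of s
def pvFill (s : List Char) : List Char → Int → List Char
  | [], _ => []
  | c :: cs, j =>
    if c = '?' then (if PySem.List.pyGetD s j '0' = '0' then '.' else '#') :: pvFill s cs (j + 1)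
    else c :: pvFill s cs j

theorem pvAfold (s : List Char) (l : List Char) (r : List Char) (j : Int) :
    l.foldl (fun (st : List Char × Int) c =>
        if c = '?' then
          (st.1 ++ [if PySem.List.pyGetD s st.2 '0' = '0' then '.' else '#'], st.2 + 1)
        else (st.1 ++ [c], st.2)) (r, j)
      = (r ++ pvFill s l j, j + l.count '?') := by
  induction l generalizing r j with
  | nil => simp [pvFill]
  | cons c cs ih =>
    by_cases h : c = '?'
    · simp [h, pvFill, ih]; ring
    · simp [h, pvFill, ih]

-- positions of '?' in l, indices starting at st
def pvPos (l : List Char) (st : Int) : List Int :=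
  (PySem.List.enumerate l st).filterMap (fun p => if p.2 = '?' then some p.1 else none)

theorem pvPos_cons (c : Char) (cs : List Char) (st : Int) :
    pvPos (c :: cs) st = (if c = '?' then [st] else []) ++ pvPos cs (st + 1) := by
  by_cases h : c = '?' <;> simp [pvPos, PySem.List.enumerate_cons, h]

theorem pvPos_shift (l : List Char) (st : Int) :
    pvPos l (st + 1) = (pvPos l st).map (· + 1) := by
  induction l generalizing st with
  | nil => simp [pvPos]
  | cons c cs ih => by_cases h : c = '?' <;> simp [pvPos_cons, h, ih]

theorem pvPos_nonneg (l : List Char) (st : Int) (h : 0 ≤ st) :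
    ∀ x ∈ pvPos l st, 0 ≤ x := by
  induction l generalizing st with
  | nil => simp [pvPos]
  | cons c cs ih =>
    intro x hx
    rw [pvPos_cons] at hx
    rcases List.mem_append.1 hx with hx | hx
    · by_cases hc : c = '?' <;> simp [hc] at hx; omega
    · exact ih (st + 1) (by omega) x hx

-- filling at positions all shifted by one leaves the head alone
theorem pvSetShift (s : List Char) (ps : List Int) (hps : ∀ x ∈ ps, 0 ≤ x)
    (k : Int) (c : Char) (r : List Char) :
    (PySem.List.enumerate (ps.map (· + 1)) k).foldl
        (fun (r : List Char) q =>
          r.set q.2.toNat (if PySem.List.pyGetD s q.1 '0' = '0' then '.' else '#')) (c :: r)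
      = c :: (PySem.List.enumerate ps k).foldl
        (fun (r : List Char) q =>
          r.set q.2.toNat (if PySem.List.pyGetD s q.1 '0' = '0' then '.' else '#')) r := by
  induction ps generalizing k r with
  | nil => simp
  | cons p ps ih =>
    have hp : 0 ≤ p := hps p (List.mem_cons_self ..)
    have h1 : (p + 1).toNat = p.toNat + 1 := by omega
    simp only [List.map_cons, PySem.List.enumerate_cons, List.foldl_cons, h1, List.set_cons_succ]
    exact ih (fun x hx => hps x (List.mem_cons_of_mem _ hx)) (k + 1) _

theorem pvBfold (s : List Char) (l : List Char) (k : Int) :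
    (PySem.List.enumerate (pvPos l 0) k).foldl
        (fun (r : List Char) q =>
          r.set q.2.toNat (if PySem.List.pyGetD s q.1 '0' = '0' then '.' else '#')) l
      = pvFill s l k := by
  induction l generalizing k with
  | nil => simp [pvPos, pvFill]
  | cons c cs ih =>
    have hshift : pvPos cs (0 + 1) = (pvPos cs 0).map (· + 1) := pvPos_shift cs 0
    have hnn := pvPos_nonneg cs 0 le_rfl
    rw [pvPos_cons, hshift]
    by_cases h : c = '?'
    · rw [if_pos h, List.singleton_append]
      simp only [PySem.List.enumerate_cons, List.foldl_cons, Int.toNat_zero, List.set_cons_zero]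
      rw [pvSetShift s _ hnn, ih]
      simp [pvFill, h]
    · rw [if_neg h, List.nil_append, pvSetShift s _ hnn, ih]
      simp [pvFill, h]

-- ===== VERDICT (by name: the statement is the Claim_ definition above) =====
theorem replace_qs_spec : Claim_equal_replace_qs := by
  intro m i size _ _
  unfold Spec_replace_qs replace_qs replace_qs_alt
  rw [PySem.List.foldl_pyRange_zero_pyGetD m.toList ' '
    (fun (st : List Char × Int) c =>
      if c = '?' then
        (st.1 ++ [if PySem.List.pyGetD (pvS i size) st.2 '0' = '0' then '.' else '#'], st.2 + 1)
      else (st.1 ++ [c], st.2)) ([], 0)]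
  rw [pvAfold (pvS i size) m.toList [] 0]
  show String.ofList (pvFill (pvS i size) m.toList 0) = _
  rw [show (PySem.List.enumerate m.toList 0).filterMap
      (fun p => if p.2 = '?' then some p.1 else none) = pvPos m.toList 0 from rfl]
  rw [pvBfold (pvS i size) m.toList 0]
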